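-- pv_equiv track=rewrite | github.com/Sri-dhar/Codes | NetworksLab/Lab11/code.py | exchange_and_update
-- ===== SOURCE A (Python) =====
-- def exchange_and_update(nodes, links, distance_vectors):
--     new_vectors = {node: dict(vector) for node, vector in distance_vectors.items()}
--     for node in nodes:
--         for neighbor in links.get(node, {}):
--             for target in nodes:
--                 new_cost = distance_vectors[node][target] + links[node][neighbor]
--                 if new_cost < new_vectors[neighbor][target]:
--                     new_vectors[neighbor][target] = new_cost
--     return new_vectors
-- ===== SOURCE B (Python) =====
-- def exchange_and_update(nodes, links, distance_vectors):
--     # Receiver-pull: precompute a reverse index incoming[receiver] = [(sender, link_cost), ...],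
--     # then build each output row in one pass instead of pushing updates sender-by-sender.
--     node_set = set(nodes)
--     incoming = {}
--     for node in nodes:
--         for neighbor, cost in links.get(node, {}).items():
--             incoming.setdefault(neighbor, []).append((node, cost))
--     new_vectors = {}
--     for receiver, vector in distance_vectors.items():
--         senders = incoming.get(receiver, [])
--         row = {}
--         for target, best in vector.items():
--             if target in node_set:
--                 for sender, cost in senders:
--                     c = distance_vectors[sender][target] + cost
--                     if c < best:
--                         best = c
--             row[target] = best
--         new_vectors[receiver] = row
--     return new_vectors
-- ===== Notes on version B (the rewrite author's own statement) =====
-- stated objective: alternative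
-- what changed: Replaces A's sender-push triple loop that repeatedly mutates new_vectors with a precomputed reverse-adjacency index incoming[receiver] followed by a single receiver-pull pass that builds each output row once.
import Mathlib
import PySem

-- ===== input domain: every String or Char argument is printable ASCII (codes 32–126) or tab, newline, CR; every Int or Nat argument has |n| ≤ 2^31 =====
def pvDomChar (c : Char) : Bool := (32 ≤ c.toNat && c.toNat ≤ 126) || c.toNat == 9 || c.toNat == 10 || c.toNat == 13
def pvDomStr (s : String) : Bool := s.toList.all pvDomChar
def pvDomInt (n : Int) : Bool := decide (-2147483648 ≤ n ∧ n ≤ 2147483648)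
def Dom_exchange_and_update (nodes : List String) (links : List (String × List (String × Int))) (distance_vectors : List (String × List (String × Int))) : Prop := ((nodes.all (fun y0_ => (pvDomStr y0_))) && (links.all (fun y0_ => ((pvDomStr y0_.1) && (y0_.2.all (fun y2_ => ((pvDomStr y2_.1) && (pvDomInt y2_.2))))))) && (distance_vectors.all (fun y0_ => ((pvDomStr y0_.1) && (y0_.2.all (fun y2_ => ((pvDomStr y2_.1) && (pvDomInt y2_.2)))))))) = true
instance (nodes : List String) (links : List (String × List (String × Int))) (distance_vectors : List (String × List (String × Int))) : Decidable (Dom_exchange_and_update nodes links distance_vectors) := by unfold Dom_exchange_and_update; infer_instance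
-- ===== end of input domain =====

-- B replaces A's sender-push triple loop mutating new_vectors by a precomputed reverse index
-- incoming[receiver] and a single receiver-pull pass building each output row; return values agree on Pre_.

-- shared boundary conversion: the Python dict-of-dicts argument as a PySem.Dict of PySem.Dicts
def pvToDict (xs : List (String × List (String × Int))) : PySem.Dict String (PySem.Dict String Int) :=
  PySem.Dict.ofList (xs.map (fun p => (p.1, PySem.Dict.ofList p.2)))

-- ===== PORT A =====
def exchange_and_update (nodes : List String) (links : List (String × List (String × Int))) (distance_vectors : List (String × List (String × Int))) : List (String × List (String × Int)) :=
  let L := pvToDict links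
  let D := pvToDict distance_vectors
  -- new_vectors = {node: dict(vector) ...} is a fresh copy of distance_vectors
  let nv := nodes.foldl (fun nv node =>
    ((L.getD node PySem.Dict.empty).keys).foldl (fun nv neighbor =>
      nodes.foldl (fun nv target =>
        let new_cost := ((D.getD node PySem.Dict.empty).getD target 0) + ((L.getD node PySem.Dict.empty).getD neighbor 0)
        if new_cost < ((nv.getD neighbor PySem.Dict.empty).getD target 0) then
          nv.modify neighbor PySem.Dict.empty (fun v => v.insert target new_cost)
        else nv) nv) nv) D
  nv.items.map (fun p => (p.1, p.2.items))

-- ===== PORT B =====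
def exchange_and_update_alt (nodes : List String) (links : List (String × List (String × Int))) (distance_vectors : List (String × List (String × Int))) : List (String × List (String × Int)) :=
  let nodeSet := PySem.Set.ofList nodes
  let L := pvToDict links
  let D := pvToDict distance_vectors
  let incoming : PySem.Dict String (List (String × Int)) :=
    nodes.foldl (fun inc node =>
      ((L.getD node PySem.Dict.empty).items).foldl (fun inc p =>
        inc.modify p.1 [] (fun l => l ++ [(node, p.2)])) inc) PySem.Dict.empty
  D.items.map (fun rv =>
    let senders := incoming.getD rv.1 []
    (rv.1, rv.2.items.map (fun tc =>
      (tc.1,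
        if PySem.Set.contains nodeSet tc.1 then
          senders.foldl (fun best sc =>
            let c := ((D.getD sc.1 PySem.Dict.empty).getD tc.1 0) + sc.2
            if c < best then c else best) tc.2
        else tc.2))))

-- ===== PRECONDITION & SPEC =====
-- Pre_ excludes exactly the inputs on which Python A raises KeyError: some relaxation step
-- indexes distance_vectors[node][target] or new_vectors[neighbor][target] at a missing key.
def Pre_exchange_and_update (nodes : List String) (links : List (String × List (String × Int))) (distance_vectors : List (String × List (String × Int))) : Prop :=
  ∀ node ∈ nodes, ∀ neighbor ∈ ((pvToDict links).getD node PySem.Dict.empty).keys, ∀ target ∈ nodes,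
    node ∈ (pvToDict distance_vectors).keys ∧
    target ∈ ((pvToDict distance_vectors).getD node PySem.Dict.empty).keys ∧
    neighbor ∈ (pvToDict distance_vectors).keys ∧
    target ∈ ((pvToDict distance_vectors).getD neighbor PySem.Dict.empty).keys
instance (nodes : List String) (links : List (String × List (String × Int))) (distance_vectors : List (String × List (String × Int))) : Decidable (Pre_exchange_and_update nodes links distance_vectors) := by unfold Pre_exchange_and_update; infer_instance

def pvWitness_exchange_and_update : List String × (List (String × List (String × Int))) × (List (String × List (String × Int))) :=
  (["a", "b"], [("a", [("b", 3)])], [("a", [("a", 0), ("b", 9)]), ("b", [("a", 7), ("b", 0)])])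

def Spec_exchange_and_update (nodes : List String) (links : List (String × List (String × Int))) (distance_vectors : List (String × List (String × Int))) (out : List (String × List (String × Int))) : Prop := out = exchange_and_update_alt nodes links distance_vectors
instance (nodes : List String) (links : List (String × List (String × Int))) (distance_vectors : List (String × List (String × Int))) (out : List (String × List (String × Int))) : Decidable (Spec_exchange_and_update nodes links distance_vectors out) := by unfold Spec_exchange_and_update; infer_instance

-- ===== CLAIM (what is proved, stated in full; the proofs are below) =====
def Claim_equal_exchange_and_update : Prop := ∀ (nodes : List String) (links : List (String × List (String × Int))) (distance_vectors : List (String × List (String × Int))), Dom_exchange_and_update nodes links distance_vectors → Pre_exchange_and_update nodes links distance_vectors → Spec_exchange_and_update nodes links distance_vectors (exchange_and_update nodes links distance_vectors)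

-- ===== LEMMAS AND PROOFS =====

-- the current estimate for target t at receiver r
def pvVal (D : PySem.Dict String (PySem.Dict String Int)) (r t : String) : Int :=
  (D.getD r PySem.Dict.empty).getD t 0

-- one relaxation step of A: u = (receiver, target, candidate cost)
def pvStep (nv : PySem.Dict String (PySem.Dict String Int)) (u : String × String × Int) :
    PySem.Dict String (PySem.Dict String Int) :=
  if u.2.2 < pvVal nv u.1 u.2.1 then
    nv.modify u.1 PySem.Dict.empty (fun v => v.insert u.2.1 u.2.2)
  else nv

-- running minimum
def pvMin (b : Int) (cs : List Int) : Int := cs.foldl (fun b c => if c < b then c else b) b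

-- the sequence of relaxation steps A performs
def pvUpdates (nodes : List String) (L D : PySem.Dict String (PySem.Dict String Int)) :
    List (String × String × Int) :=
  nodes.flatMap (fun node => ((L.getD node PySem.Dict.empty).keys).flatMap (fun nb =>
    nodes.map (fun t => (nb, t, pvVal D node t + (L.getD node PySem.Dict.empty).getD nb 0))))

-- the (receiver, (sender, cost)) pairs B's incoming index is built from
def pvPairs (nodes : List String) (L : PySem.Dict String (PySem.Dict String Int)) :
    List (String × String × Int) :=
  nodes.flatMap (fun node => ((L.getD node PySem.Dict.empty).items).map (fun q => (q.1, (node, q.2))))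

lemma pv_foldl_flatMap {α β γ : Type} (l : List α) (f : α → List β) (g : γ → β → γ) (b : γ) :
    (l.flatMap f).foldl g b = l.foldl (fun b a => (f a).foldl g b) b := by
  induction l generalizing b with
  | nil => rfl
  | cons x xs ih => simp [List.flatMap_cons, List.foldl_append, ih]

lemma A_eq_fold (nodes : List String) (links distance_vectors : List (String × List (String × Int))) :
    exchange_and_update nodes links distance_vectors =
      ((pvUpdates nodes (pvToDict links) (pvToDict distance_vectors)).foldl pvStep
        (pvToDict distance_vectors)).items.map (fun p => (p.1, p.2.items)) := by
  simp only [exchange_and_update, pvUpdates, pv_foldl_flatMap, List.foldl_map, pvStep, pvVal]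

lemma pvVal_step_match (nv : PySem.Dict String (PySem.Dict String Int)) (r t : String) (c : Int) :
    pvVal (pvStep nv (r, t, c)) r t = if c < pvVal nv r t then c else pvVal nv r t := by
  simp only [pvStep, pvVal]
  split_ifs with h1
  · rw [PySem.Dict.getD_modify, if_pos rfl, PySem.Dict.getD_insert, if_pos rfl]
  · rfl

lemma pvVal_step_ne (nv : PySem.Dict String (PySem.Dict String Int)) (u : String × String × Int)
    (r t : String) (h : ¬(u.1 = r ∧ u.2.1 = t)) : pvVal (pvStep nv u) r t = pvVal nv r t := by
  simp only [pvStep, pvVal]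
  split_ifs with h1
  · rw [PySem.Dict.getD_modify]
    by_cases hr : r = u.1
    · rw [if_pos hr, PySem.Dict.getD_insert, if_neg (fun hte => h ⟨hr.symm, hte.symm⟩), hr]
    · rw [if_neg hr]
  · rfl

lemma pvMin_cons (b c : Int) (cs : List Int) :
    pvMin b (c :: cs) = pvMin (if c < b then c else b) cs := rfl

lemma pvMin_append (b : Int) (xs ys : List Int) :
    pvMin b (xs ++ ys) = pvMin (pvMin b xs) ys := by
  simp [pvMin, List.foldl_append]

lemma pvVal_foldl (us : List (String × String × Int)) (nv : PySem.Dict String (PySem.Dict String Int)) (r t : String) :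
    pvVal (us.foldl pvStep nv) r t =
      pvMin (pvVal nv r t) ((us.filter (fun u => u.1 == r && u.2.1 == t)).map (fun u => u.2.2)) := by
  induction us generalizing nv with
  | nil => rfl
  | cons u us ih =>
    obtain ⟨u1, u2, c⟩ := u
    by_cases hm : ((u1, u2, c).1 == r && (u1, u2, c).2.1 == t) = true
    · simp only [Bool.and_eq_true, beq_iff_eq] at hm
      obtain ⟨rfl, rfl⟩ := hm
      rw [List.filter_cons_of_pos (by simp), List.map_cons, pvMin_cons, List.foldl_cons, ih,
        pvVal_step_match]
    · simp only [List.filter_cons]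
      rw [if_neg hm, List.foldl_cons, ih, pvVal_step_ne]
      intro hc
      exact hm (by simp only [Bool.and_eq_true, beq_iff_eq]; exact hc)

def pvShape (A B : PySem.Dict String (PySem.Dict String Int)) : Prop :=
  A.keys = B.keys ∧ ∀ r, (A.getD r PySem.Dict.empty).keys = (B.getD r PySem.Dict.empty).keys

lemma pvShape_step (D nv : PySem.Dict String (PySem.Dict String Int)) (u : String × String × Int)
    (h : pvShape nv D) (h1 : u.1 ∈ D.keys) (h2 : u.2.1 ∈ (D.getD u.1 PySem.Dict.empty).keys) :
    pvShape (pvStep nv u) D := by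
  unfold pvStep
  split_ifs with hc
  · refine ⟨?_, ?_⟩
    · rw [PySem.Dict.keys_modify]
      have hcont : nv.contains u.1 = true := by
        rw [PySem.Dict.contains_iff_mem_keys, h.1]; exact h1
      rw [PySem.Dict.keys_insert_of_contains _ _ hcont]; exact h.1
    · intro r
      rw [PySem.Dict.getD_modify]
      by_cases hr : r = u.1
      · rw [if_pos hr, hr]
        have hcont2 : (nv.getD u.1 PySem.Dict.empty).contains u.2.1 = true := by
          rw [PySem.Dict.contains_iff_mem_keys, h.2 u.1]; exact h2
        rw [PySem.Dict.keys_insert_of_contains _ _ hcont2]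
        exact h.2 u.1
      · rw [if_neg hr]; exact h.2 r
  · exact h

lemma pvShape_foldl (D : PySem.Dict String (PySem.Dict String Int))
    (us : List (String × String × Int)) (nv : PySem.Dict String (PySem.Dict String Int))
    (h : pvShape nv D)
    (hu : ∀ u ∈ us, u.1 ∈ D.keys ∧ u.2.1 ∈ (D.getD u.1 PySem.Dict.empty).keys) :
    pvShape (us.foldl pvStep nv) D := by
  induction us generalizing nv with
  | nil => exact h
  | cons u us ih =>
    rw [List.foldl_cons]
    have hm := hu u (List.mem_cons_self ..)
    exact ih (pvStep nv u) (pvShape_step D nv u h hm.1 hm.2)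
      (fun v hv => hu v (List.mem_cons_of_mem _ hv))

lemma pv_values_foldl_insert {κ ν : Type} [BEq κ] [LawfulBEq κ] (ps : List (κ × ν))
    (d : PySem.Dict κ ν) (w : ν)
    (hw : w ∈ (ps.foldl (fun d p => d.insert p.1 p.2) d).values) :
    w ∈ d.values ∨ ∃ p ∈ ps, w = p.2 := by
  induction ps generalizing d with
  | nil => exact Or.inl hw
  | cons p ps ih =>
    rw [List.foldl_cons] at hw
    rcases ih (d.insert p.1 p.2) hw with h | h
    · rcases PySem.Dict.mem_values_insert d p.1 p.2 w h with h' | h'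
      · exact Or.inr ⟨p, List.mem_cons_self .., h'⟩
      · exact Or.inl h'
    · obtain ⟨q, hq, hq2⟩ := h
      exact Or.inr ⟨q, List.mem_cons_of_mem _ hq, hq2⟩

lemma pvToDict_row_nodup (xs : List (String × List (String × Int))) (r : String) :
    ((pvToDict xs).getD r PySem.Dict.empty).keys.Nodup := by
  rw [PySem.Dict.getD_eq_get?_getD]
  cases hg : (pvToDict xs).get? r with
  | none => simp [PySem.Dict.keys_empty, List.Nodup]
  | some row =>
    simp only [Option.getD_some]
    have hmem := PySem.Dict.mem_items_of_get?_eq_some _ hg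
    have hv : row ∈ (pvToDict xs).values := by
      simp only [PySem.Dict.values]
      exact List.mem_map.mpr ⟨(r, row), hmem, rfl⟩
    have : row ∈ (PySem.Dict.empty : PySem.Dict String (PySem.Dict String Int)).values ∨
        ∃ p ∈ xs.map (fun p => (p.1, PySem.Dict.ofList p.2)), row = p.2 :=
      pv_values_foldl_insert _ _ _ hv
    rcases this with h | ⟨p, hp, hpeq⟩
    · simp [PySem.Dict.values, PySem.Dict.empty] at h
    · obtain ⟨q, _, rfl⟩ := List.mem_map.mp hp
      subst hpeq
      exact PySem.Dict.nodup_keys_ofList _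

lemma pvMin_flatMap_congr {α : Type} (l : List α) (f g : α → List Int)
    (h : ∀ a ∈ l, ∀ b, pvMin b (f a) = pvMin b (g a)) :
    ∀ b, pvMin b (l.flatMap f) = pvMin b (l.flatMap g) := by
  induction l with
  | nil => intro b; rfl
  | cons x xs ih =>
    intro b
    rw [List.flatMap_cons, List.flatMap_cons, pvMin_append, pvMin_append,
      h x (List.mem_cons_self ..) b]
    exact ih (fun a ha b => h a (List.mem_cons_of_mem _ ha) b) _

lemma pvMin_const_absorb {α : Type} (l : List α) (c b : Int) :
    pvMin (if c < b then c else b) (l.map (fun _ => c)) = if c < b then c else b := by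
  induction l with
  | nil => rfl
  | cons x xs ih =>
    rw [List.map_cons, pvMin_cons]
    have h : (if c < (if c < b then c else b) then c else (if c < b then c else b)) =
        if c < b then c else b := by split_ifs <;> omega
    rw [h]; exact ih

lemma pvMin_map_const {α : Type} (l : List α) (c b : Int) (hl : l ≠ []) :
    pvMin b (l.map (fun _ => c)) = if c < b then c else b := by
  cases l with
  | nil => exact absurd rfl hl
  | cons x xs => rw [List.map_cons, pvMin_cons]; exact pvMin_const_absorb xs c b

lemma pv_filter_map_eq_flatMap {α β : Type} (l : List α) (p : α → Bool) (g : α → β) :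
    (l.filter p).map g = l.flatMap (fun x => if p x then [g x] else []) := by
  induction l with
  | nil => rfl
  | cons x xs ih => by_cases h : p x <;> simp [h, ih]

lemma pvMin_foldl_f {α : Type} (l : List α) (f : α → Int) (b : Int) :
    l.foldl (fun best x => if f x < best then f x else best) b = pvMin b (l.map f) := by
  unfold pvMin
  rw [List.foldl_map]

lemma pvValue_core (nodes : List String) (links distance_vectors : List (String × List (String × Int)))
    (r t : String) :
    pvMin (pvVal (pvToDict distance_vectors) r t)
      (((pvUpdates nodes (pvToDict links) (pvToDict distance_vectors)).filter
          (fun u => u.1 == r && u.2.1 == t)).map (fun u => u.2.2)) =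
      (if PySem.Set.contains (PySem.Set.ofList nodes) t then
        (((pvPairs nodes (pvToDict links)).filter (fun p => p.1 == r)).map (fun p => p.2)).foldl
          (fun best sc =>
            let c := (((pvToDict distance_vectors).getD sc.1 PySem.Dict.empty).getD t 0) + sc.2
            if c < best then c else best) (pvVal (pvToDict distance_vectors) r t)
      else pvVal (pvToDict distance_vectors) r t) := by
  by_cases ht : t ∈ nodes
  · have hset : PySem.Set.contains (PySem.Set.ofList nodes) t = true := by
      simp [pysem, ht]
    rw [hset, if_pos rfl]
    rw [show (fun (best : Int) (sc : String × Int) =>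
          let c := (((pvToDict distance_vectors).getD sc.1 PySem.Dict.empty).getD t 0) + sc.2
          if c < best then c else best) =
        (fun (best : Int) (sc : String × Int) =>
          if (pvVal (pvToDict distance_vectors) sc.1 t + sc.2) < best then
            (pvVal (pvToDict distance_vectors) sc.1 t + sc.2) else best) from rfl]
    rw [pvMin_foldl_f]
    simp only [pvUpdates, pvPairs, List.filter_flatMap, List.map_flatMap, List.filter_map,
      List.map_map, PySem.Dict.keys, Function.comp_def]
    simp only [List.flatMap_map]
    refine pvMin_flatMap_congr nodes _ _ (fun node hnode b => ?_) _
    rw [pv_filter_map_eq_flatMap]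
    refine pvMin_flatMap_congr _ _ _ (fun q hq b => ?_) b
    by_cases hqr : q.1 = r
    · have hq2 : ((pvToDict links).getD node PySem.Dict.empty).getD q.1 0 = q.2 :=
        PySem.Dict.getD_of_mem_items _ (by simpa using hq) (pvToDict_row_nodup links node) 0
      have hpred : (fun t' => (q.1 == r && t' == t)) = fun t' => t' == t := by
        funext t'; simp [hqr]
      rw [hpred]
      have hmapc : (nodes.filter (fun t' => t' == t)).map
            (fun t' => pvVal (pvToDict distance_vectors) node t' +
              ((pvToDict links).getD node PySem.Dict.empty).getD q.1 0) =
          (nodes.filter (fun t' => t' == t)).map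
            (fun _ => pvVal (pvToDict distance_vectors) node t +
              ((pvToDict links).getD node PySem.Dict.empty).getD q.1 0) := by
        refine List.map_congr_left (fun x hx => ?_)
        have hxt : x = t := by simpa using (List.mem_filter.mp hx).2
        rw [hxt]
      have hne : nodes.filter (fun t' => t' == t) ≠ [] :=
        List.ne_nil_of_mem (List.mem_filter.mpr ⟨ht, by simp⟩)
      rw [hmapc, pvMin_map_const _ _ _ hne, hq2]
      simp [hqr, pvMin]
    · have hpred : (fun t' => (q.1 == r && t' == t)) = fun _ => false := by
        funext t'; simp [hqr]
      rw [hpred, List.filter_false, List.map_nil, if_neg (by simp [hqr])]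
  · have hset : PySem.Set.contains (PySem.Set.ofList nodes) t = false := by
      simp [pysem, ht]
    rw [hset]
    simp only [Bool.false_eq_true, if_false]
    have hfil : (pvUpdates nodes (pvToDict links) (pvToDict distance_vectors)).filter
        (fun u => u.1 == r && u.2.1 == t) = [] := by
      rw [List.filter_eq_nil_iff]
      intro u hu
      simp only [pvUpdates, List.mem_flatMap, List.mem_map] at hu
      obtain ⟨node, hnode, nb, hnb, t', ht', rfl⟩ := hu
      simp only [Bool.and_eq_true, beq_iff_eq, not_and]
      intro _ h2
      exact absurd (h2 ▸ ht') ht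
    rw [hfil]
    rfl

lemma B_eq (nodes : List String) (links distance_vectors : List (String × List (String × Int))) :
    exchange_and_update_alt nodes links distance_vectors =
      (pvToDict distance_vectors).items.map (fun rv =>
        (rv.1, rv.2.items.map (fun tc =>
          (tc.1,
            if PySem.Set.contains (PySem.Set.ofList nodes) tc.1 then
              (((pvPairs nodes (pvToDict links)).filter (fun p => p.1 == rv.1)).map (fun p => p.2)).foldl
                (fun best sc =>
                  let c := (((pvToDict distance_vectors).getD sc.1 PySem.Dict.empty).getD tc.1 0) + sc.2
                  if c < best then c else best) tc.2
            else tc.2)))) := by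
  have hinc : (nodes.foldl (fun inc node =>
      ((pvToDict links).getD node PySem.Dict.empty).items.foldl
        (fun inc p => inc.modify p.1 [] (fun l => l ++ [(node, p.2)])) inc)
      (PySem.Dict.empty : PySem.Dict String (List (String × Int)))) =
      (pvPairs nodes (pvToDict links)).foldl
        (fun d p => d.modify p.1 [] (fun l => l ++ [p.2])) PySem.Dict.empty := by
    rw [pvPairs, pv_foldl_flatMap]
    simp only [List.foldl_map]
  simp only [exchange_and_update_alt]
  rw [hinc]
  simp only [PySem.Dict.getD_foldl_modify_append, PySem.Dict.getD_empty, List.nil_append]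

-- ===== VERDICT (by name: the statement is the Claim_ definition above) =====
theorem exchange_and_update_spec : Claim_equal_exchange_and_update := by
  intro nodes links dv _ hpre
  unfold Spec_exchange_and_update
  rw [A_eq_fold, B_eq]
  have hD : (pvToDict dv).keys.Nodup := PySem.Dict.nodup_keys_ofList _
  have hu : ∀ u ∈ pvUpdates nodes (pvToDict links) (pvToDict dv),
      u.1 ∈ (pvToDict dv).keys ∧ u.2.1 ∈ ((pvToDict dv).getD u.1 PySem.Dict.empty).keys := by
    intro u hu
    simp only [pvUpdates, List.mem_flatMap, List.mem_map] at hu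
    obtain ⟨node, hnode, nb, hnb, t, htmem, rfl⟩ := hu
    obtain ⟨_, _, h3, h4⟩ := hpre node hnode nb hnb t htmem
    exact ⟨h3, h4⟩
  have hshape := pvShape_foldl (pvToDict dv) (pvUpdates nodes (pvToDict links) (pvToDict dv))
    (pvToDict dv) ⟨rfl, fun _ => rfl⟩ hu
  rw [PySem.Dict.items_eq_map_keys _ (hshape.1 ▸ hD) PySem.Dict.empty, List.map_map]
  rw [PySem.Dict.items_eq_map_keys (pvToDict dv) hD PySem.Dict.empty, List.map_map]
  rw [hshape.1]
  apply List.map_congr_left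
  intro r hr
  simp only [Function.comp]
  have hrowD : ((pvToDict dv).getD r PySem.Dict.empty).keys.Nodup := pvToDict_row_nodup dv r
  have hrowF : (((pvUpdates nodes (pvToDict links) (pvToDict dv)).foldl pvStep (pvToDict dv)).getD r
      PySem.Dict.empty).keys.Nodup := by rw [hshape.2 r]; exact hrowD
  rw [PySem.Dict.items_eq_map_keys _ hrowF 0, PySem.Dict.items_eq_map_keys _ hrowD 0,
    List.map_map, hshape.2 r]
  congr 1
  apply List.map_congr_left
  intro t htk
  simp only [Function.comp]
  congr 1
  show pvVal _ r t = _
  rw [pvVal_foldl]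
  exact pvValue_core nodes links dv r t
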